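-- pv_equiv track=rewrite | github.com/StarSein/BaekJoon | 백준/Silver/14575. 뒤풀이/뒤풀이.py | solution
-- ===== SOURCE A (Python) =====
-- from typing import List, Tuple
--
-- def solution(N: int, T: int, inquiries: List[Tuple[int, int]]) -> int:
--     def is_able(S: int) -> bool:
--         upper_bound = 0
--         for Li, Ri in inquiries:
--             if S < Li:
--                 return False
--             upper_bound += min(Ri, S)
--         return upper_bound >= T
--
--     lower_bound = sum(Li for Li, Ri in inquiries)
--     if lower_bound > T:
--         return -1
--     lp, rp = 1, int(1e6)
--     answer = -1
--     while lp <= rp: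
--         mid = (lp + rp) >> 1
--         if is_able(mid):
--             answer = mid
--             rp = mid - 1
--         else:
--             lp = mid + 1
--     return answer
-- ===== SOURCE B (Python) =====
-- from typing import List, Tuple
--
-- def _scan(T: int, lo: int, cap: int, pre: int, rs: List[int]) -> int:
--     # rs: remaining sorted thresholds; pre = sum of consumed thresholds (all <= lo);
--     # finds the least S in [lo, cap] with pre + sum(min(r, S) for r in rs) >= T, else -1.
--     if not rs:
--         if lo <= cap and pre >= T:
--             return lo
--         return -1
--     r = rs[0]
--     m = len(rs)
--     hi = min(cap, r - 1)
--     if lo <= hi: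
--         need = T - pre
--         s = -(-need // m)  # ceil(need / m); on [lo, hi] the sum is pre + m*S
--         if s < lo:
--             s = lo
--         if s <= hi:
--             return s
--     return _scan(T, max(lo, r), cap, pre + r, rs[1:])
--
-- def solution(N: int, T: int, inquiries: List[Tuple[int, int]]) -> int:
--     if sum(l for l, _ in inquiries) > T:
--         return -1
--     lo = 1
--     for l, _ in inquiries:
--         if l > lo:
--             lo = l
--     rs = sorted(r for _, r in inquiries)
--     return _scan(T, lo, 10 ** 6, 0, rs)
-- ===== Notes on version B (the rewrite author's own statement) =====
-- stated objective: alternative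
-- what changed: Replaces A's binary search (re-summing min(Ri,S) over all inquiries at each probe) with a single pass over the sorted R-thresholds that inverts the piecewise-linear coverage function in closed form on each segment, starting from max(1, max Li).
import Mathlib
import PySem

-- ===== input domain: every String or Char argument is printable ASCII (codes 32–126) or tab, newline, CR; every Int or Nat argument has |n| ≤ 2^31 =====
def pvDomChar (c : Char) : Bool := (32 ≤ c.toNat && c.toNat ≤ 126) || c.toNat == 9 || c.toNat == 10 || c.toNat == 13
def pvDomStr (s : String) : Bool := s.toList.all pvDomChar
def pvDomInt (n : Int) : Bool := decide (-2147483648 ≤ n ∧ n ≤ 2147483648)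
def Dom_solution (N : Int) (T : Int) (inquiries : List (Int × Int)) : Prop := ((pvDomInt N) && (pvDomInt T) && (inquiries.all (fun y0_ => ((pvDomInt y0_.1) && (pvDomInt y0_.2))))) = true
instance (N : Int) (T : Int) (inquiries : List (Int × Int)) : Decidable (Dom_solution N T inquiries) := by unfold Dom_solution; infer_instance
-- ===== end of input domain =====

-- B replaces A's O(n · log(10^6)) binary search with one pass over the sorted R-thresholds,
-- inverting the piecewise-linear coverage function in closed form on each segment (objective: alternative).

-- ===== PORT A =====

-- is_able(S): early-return False when S < Li, else accumulate min(Ri, S); finally upper_bound >= T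
def isAbleGo (T S : Int) : List (Int × Int) → Int → Bool
  | [], acc => decide (acc ≥ T)
  | (l, r) :: rest, acc => if S < l then false else isAbleGo T S rest (acc + min r S)

-- the while lp <= rp loop; (lp+rp) >> 1 on these ints is floor division by 2 (Python >> floors)
def bsLoop (T : Int) (inqs : List (Int × Int)) (lp rp ans : Int) : Int :=
  if h : lp ≤ rp then
    let mid := PySem.Int.floordiv (lp + rp) 2
    if isAbleGo T mid inqs 0 then bsLoop T inqs lp (mid - 1) mid
    else bsLoop T inqs (mid + 1) rp ans
  else ans
termination_by (rp + 1 - lp).toNat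
decreasing_by
  all_goals
    have h2 : PySem.Int.floordiv (lp + rp) 2 = (lp + rp) / 2 :=
      PySem.Int.floordiv_eq_ediv_of_pos (by norm_num)
    simp only [h2] at *
    omega

def solution (N : Int) (T : Int) (inquiries : List (Int × Int)) : Int :=
  let lower_bound := (inquiries.map (fun p => p.1)).sum
  if lower_bound > T then -1
  else bsLoop T inquiries 1 1000000 (-1)

-- ===== PORT B =====

-- _scan: walk the sorted thresholds; on each segment [lo, min(cap, r-1)] the coverage is
-- pre + m*S, so the least S with pre + m*S >= T is -(-need // m) (ceil), clamped to lo.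
def scanGo (T : Int) (lo cap pre : Int) : List Int → Int
  | [] => if lo ≤ cap ∧ pre ≥ T then lo else -1
  | r :: rest =>
    let m : Int := (r :: rest).length
    let hi := min cap (r - 1)
    if lo ≤ hi then
      let need := T - pre
      let s := -(PySem.Int.floordiv (-need) m)
      let s' := if s < lo then lo else s
      if s' ≤ hi then s' else scanGo T (max lo r) cap (pre + r) rest
    else scanGo T (max lo r) cap (pre + r) rest

def solution_alt (N : Int) (T : Int) (inquiries : List (Int × Int)) : Int :=
  if (inquiries.map (fun p => p.1)).sum > T then -1
  else
    let lo := inquiries.foldl (fun lo p => if p.1 > lo then p.1 else lo) 1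
    let rs := PySem.List.sorted (inquiries.map (fun p => p.2)) (fun x => x) false
    scanGo T lo 1000000 0 rs

-- ===== PRECONDITION & SPEC =====
def Spec_solution (N : Int) (T : Int) (inquiries : List (Int × Int)) (out : Int) : Prop := out = solution_alt N T inquiries
instance (N : Int) (T : Int) (inquiries : List (Int × Int)) (out : Int) : Decidable (Spec_solution N T inquiries out) := by unfold Spec_solution; infer_instance

-- ===== CLAIM (what is proved, stated in full; the proofs are below) =====
def Claim_equal_solution : Prop := ∀ (N : Int) (T : Int) (inquiries : List (Int × Int)), Dom_solution N T inquiries → Spec_solution N T inquiries (solution N T inquiries)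

-- ===== LEMMAS AND PROOFS =====

-- the coverage function g(S) = sum of min(r, S)
def gsum (rs : List Int) (s : Int) : Int := (rs.map (fun r => min r s)).sum

-- res is the least s in [lo, cap] satisfying Q, or -1 when none exists
def LeastRes (Q : Int → Prop) (lo cap res : Int) : Prop :=
  (res = -1 ∧ ∀ s, lo ≤ s → s ≤ cap → ¬ Q s) ∨
  (lo ≤ res ∧ res ≤ cap ∧ Q res ∧ ∀ s, lo ≤ s → s < res → ¬ Q s)

theorem leastRes_unique (Q1 Q2 : Int → Prop) (lo2 cap r1 r2 : Int)
    (h2lo : 1 ≤ lo2)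
    (hiff : ∀ s, 1 ≤ s → s ≤ cap → (Q1 s ↔ lo2 ≤ s ∧ Q2 s))
    (h1 : LeastRes Q1 1 cap r1) (h2 : LeastRes Q2 lo2 cap r2) : r1 = r2 := by
  rcases h1 with ⟨hr1, hn1⟩ | ⟨ha1, hb1, hq1, hm1⟩ <;>
    rcases h2 with ⟨hr2, hn2⟩ | ⟨ha2, hb2, hq2, hm2⟩
  · omega
  · exact absurd ((hiff r2 (by omega) hb2).mpr ⟨ha2, hq2⟩) (hn1 r2 (by omega) hb2)
  · exact absurd ((hiff r1 (by omega) hb1).mp hq1).2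
      (hn2 r1 ((hiff r1 (by omega) hb1).mp hq1).1 hb1)
  · rcases lt_trichotomy r1 r2 with h | h | h
    · have := (hiff r1 (by omega) hb1).mp hq1
      exact absurd this.2 (hm2 r1 this.1 h)
    · exact h
    · exact absurd ((hiff r2 (by omega) hb2).mpr ⟨ha2, hq2⟩) (hm1 r2 (by omega) h)

theorem gsum_mono (rs : List Int) (s t : Int) (h : s ≤ t) : gsum rs s ≤ gsum rs t := by
  induction rs with
  | nil => simp [gsum]
  | cons r rest ih => simp only [gsum, List.map_cons, List.sum_cons] at *; omega

theorem gsum_of_le (rs : List Int) (s : Int) (h : ∀ x ∈ rs, s ≤ x) :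
    gsum rs s = rs.length * s := by
  induction rs with
  | nil => simp [gsum]
  | cons r rest ih =>
    have hr := h r (by simp)
    simp only [gsum, List.map_cons, List.sum_cons, List.length_cons] at *
    rw [ih (fun x hx => h x (by simp [hx]))]
    have : min r s = s := by omega
    rw [this]; push_cast; ring

theorem isAbleGo_eq (T S : Int) (inqs : List (Int × Int)) (acc : Int) :
    isAbleGo T S inqs acc =
      decide ((∀ p ∈ inqs, p.1 ≤ S) ∧ acc + gsum (inqs.map (fun p => p.2)) S ≥ T) := by
  induction inqs generalizing acc with
  | nil => simp [isAbleGo, gsum]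
  | cons p rest ih =>
    obtain ⟨l, r⟩ := p
    simp only [isAbleGo]
    by_cases h : S < l
    · have hn : ¬ ((∀ q ∈ (l, r) :: rest, q.1 ≤ S) ∧
          acc + gsum (((l, r) :: rest).map (fun p => p.2)) S ≥ T) := by
        rintro ⟨hall, -⟩
        have := hall (l, r) (by simp)
        simp only at this
        omega
      simp [h, hn]
    · rw [if_neg h, ih]
      have hls : l ≤ S := by omega
      rw [decide_eq_decide]
      simp only [gsum, List.map_cons, List.sum_cons, List.mem_cons]
      constructor
      · rintro ⟨ha, hb⟩
        refine ⟨?_, by omega⟩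
        rintro q (rfl | hq)
        · exact hls
        · exact ha q hq
      · rintro ⟨ha, hb⟩
        exact ⟨fun q hq => ha q (Or.inr hq), by omega⟩

theorem ceil_le_iff (need m s : Int) (hm : 0 < m) :
    -((-need) / m) ≤ s ↔ need ≤ m * s := by
  rw [neg_le, Int.le_ediv_iff_mul_le hm, mul_comm, mul_neg, neg_le_neg_iff]

theorem scanGo_correct (T cap : Int) (rs : List Int) :
    ∀ lo pre, rs.Pairwise (· ≤ ·) →
      LeastRes (fun s => pre + gsum rs s ≥ T) lo cap (scanGo T lo cap pre rs) := by
  induction rs with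
  | nil =>
    intro lo pre _
    simp only [scanGo, gsum, List.map_nil, List.sum_nil]
    by_cases h : lo ≤ cap ∧ pre ≥ T
    · rw [if_pos h]
      exact Or.inr ⟨le_refl _, h.1, by omega, fun s h1 h2 => by omega⟩
    · rw [if_neg h]
      exact Or.inl ⟨rfl, fun s h1 h2 hq => by omega⟩
  | cons r rest ih =>
    intro lo pre hp
    rw [List.pairwise_cons] at hp
    obtain ⟨hrle, hpr⟩ := hp
    have hm : (0 : Int) < ((r :: rest).length : Int) := by
      simp only [List.length_cons]; positivity
    have hfd : PySem.Int.floordiv (-(T - pre)) ((r :: rest).length : Int)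
        = (-(T - pre)) / ((r :: rest).length : Int) :=
      PySem.Int.floordiv_eq_ediv_of_pos hm
    -- on a segment where s is below every threshold, the coverage is linear
    have hlin : ∀ s : Int, s < r → gsum (r :: rest) s = ((r :: rest).length : Int) * s := by
      intro s hs
      apply gsum_of_le
      intro x hx
      rcases List.mem_cons.mp hx with rfl | hx
      · omega
      · have := hrle x hx; omega
    have hsplit : ∀ s : Int, r ≤ s → gsum (r :: rest) s = r + gsum rest s := by
      intro s hs
      simp only [gsum, List.map_cons, List.sum_cons]
      have : min r s = r := by omega
      omega
    -- the recursive call handles everything from max lo r upward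
    have hrec : (¬ ∃ s, lo ≤ s ∧ s < r ∧ s ≤ cap ∧ T ≤ pre + ((r :: rest).length : Int) * s) →
        LeastRes (fun s => pre + gsum (r :: rest) s ≥ T) lo cap
          (scanGo T (max lo r) cap (pre + r) rest) := by
      intro hno
      have hfail : ∀ s, lo ≤ s → s ≤ cap → s < r → ¬ (pre + gsum (r :: rest) s ≥ T) := by
        intro s hs1 hs2 hs3 hq
        rw [hlin s hs3] at hq
        exact hno ⟨s, hs1, hs3, hs2, by omega⟩
      rcases ih (max lo r) (pre + r) hpr with ⟨hr0, hn0⟩ | ⟨ha0, hb0, hq0, hm0⟩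
      · refine Or.inl ⟨hr0, fun s hs1 hs2 hq => ?_⟩
        by_cases hsr : s < r
        · exact hfail s hs1 hs2 hsr hq
        · refine hn0 s (by omega) hs2 ?_
          dsimp only at hq ⊢
          rw [hsplit s (by omega)] at hq
          omega
      · refine Or.inr ⟨by omega, hb0, ?_, fun s hs1 hs2 => ?_⟩
        · dsimp only
          rw [hsplit _ (by omega)]
          omega
        · by_cases hsr : s < r
          · exact hfail s hs1 (by omega) hsr
          · intro hq
            refine hm0 s (by omega) hs2 ?_
            dsimp only at hq ⊢
            rw [hsplit s (by omega)] at hq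
            omega
    simp only [scanGo, hfd]
    by_cases h1 : lo ≤ min cap (r - 1)
    · rw [if_pos h1]
      set sc := -(-(T - pre) / ((r :: rest).length : Int)) with hsc
      have hceil : ∀ s : Int, sc ≤ s ↔ T - pre ≤ ((r :: rest).length : Int) * s :=
        fun s => ceil_le_iff (T - pre) _ s hm
      by_cases h2 : (if sc < lo then lo else sc) ≤ min cap (r - 1)
      · rw [if_pos h2]
        set s' := if sc < lo then lo else sc with hs'
        have hlos' : lo ≤ s' := by rw [hs']; split_ifs <;> omega
        have hscs' : sc ≤ s' := by rw [hs']; split_ifs <;> omega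
        refine Or.inr ⟨hlos', by omega, ?_, fun s hsa hsb hq => ?_⟩
        · have := (hceil s').mp hscs'
          dsimp only
          rw [hlin s' (by omega)]
          omega
        · have hsr : s < r := by omega
          dsimp only at hq
          rw [hlin s hsr] at hq
          have hscle : sc ≤ s := (hceil s).mpr (by omega)
          have : ¬ sc < lo := by omega
          rw [hs', if_neg this] at hlos' hsb
          omega
      · rw [if_neg h2]
        apply hrec
        rintro ⟨s, hsa, hsb, hsc2, hq⟩
        have hscle : sc ≤ s := (hceil s).mpr (by omega)
        have : (if sc < lo then lo else sc) ≤ s := by split_ifs <;> omega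
        omega
    · rw [if_neg h1]
      apply hrec
      rintro ⟨s, hsa, hsb, hsc2, hq⟩
      omega

theorem isAble_mono (T : Int) (inqs : List (Int × Int)) (s t : Int) (h : s ≤ t)
    (hs : isAbleGo T s inqs 0 = true) : isAbleGo T t inqs 0 = true := by
  rw [isAbleGo_eq, decide_eq_true_eq] at hs ⊢
  obtain ⟨ha, hb⟩ := hs
  have := gsum_mono (inqs.map (fun p => p.2)) s t h
  exact ⟨fun p hp => le_trans (ha p hp) h, by omega⟩

theorem bsLoop_correct (T : Int) (inqs : List (Int × Int)) :
    ∀ (n : Nat) (lp rp ans : Int), (rp + 1 - lp).toNat = n →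
      1 ≤ lp →
      (∀ s, 1 ≤ s → s < lp → ¬ isAbleGo T s inqs 0 = true) →
      ((ans = -1 ∧ rp = 1000000) ∨
        (ans = rp + 1 ∧ isAbleGo T ans inqs 0 = true ∧ 1 ≤ ans ∧ ans ≤ 1000000)) →
      LeastRes (fun s => isAbleGo T s inqs 0 = true) 1 1000000 (bsLoop T inqs lp rp ans) := by
  intro n
  induction n using Nat.strong_induction_on with
  | _ n IH =>
    intro lp rp ans hn h1 hlow hup
    rw [bsLoop]
    by_cases hle : lp ≤ rp
    · rw [dif_pos hle]
      have hfd : PySem.Int.floordiv (lp + rp) 2 = (lp + rp) / 2 :=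
        PySem.Int.floordiv_eq_ediv_of_pos (by norm_num)
      simp only [hfd]
      have hrp : rp ≤ 1000000 := by rcases hup with ⟨-, h⟩ | ⟨h, -, -, h2⟩ <;> omega
      by_cases hab : isAbleGo T ((lp + rp) / 2) inqs 0 = true
      · rw [if_pos hab]
        exact IH _ (by omega) lp ((lp + rp) / 2 - 1) ((lp + rp) / 2) rfl h1 hlow
          (Or.inr ⟨by omega, hab, by omega, by omega⟩)
      · rw [if_neg hab]
        refine IH _ (by omega) ((lp + rp) / 2 + 1) rp ans rfl (by omega) ?_ hup
        intro s hs1 hs2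
        by_cases hslp : s < lp
        · exact hlow s hs1 hslp
        · intro hq
          exact hab (isAble_mono T inqs s _ (by omega) hq)
    · rw [dif_neg hle]
      rcases hup with ⟨rfl, hrp⟩ | ⟨hans, hq, ha1, ha2⟩
      · exact Or.inl ⟨rfl, fun s hs1 hs2 => hlow s hs1 (by omega)⟩
      · exact Or.inr ⟨by omega, by omega, hq, fun s hs1 hs2 => hlow s hs1 (by omega)⟩

theorem foldl_max_le (inqs : List (Int × Int)) :
    ∀ (a s : Int), (inqs.foldl (fun lo p => if p.1 > lo then p.1 else lo) a ≤ s ↔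
      a ≤ s ∧ ∀ p ∈ inqs, p.1 ≤ s) := by
  induction inqs with
  | nil => simp
  | cons p rest ih =>
    intro a s
    simp only [List.foldl_cons]
    rw [ih]
    have hif : ((if p.1 > a then p.1 else a) ≤ s) ↔ (a ≤ s ∧ p.1 ≤ s) := by
      split_ifs <;> omega
    rw [hif, List.forall_mem_cons]
    tauto

theorem gsum_perm (xs ys : List Int) (s : Int) (h : xs.Perm ys) : gsum xs s = gsum ys s :=
  (h.map (fun r => min r s)).sum_eq

-- ===== VERDICT (by name: the statement is the Claim_ definition above) =====
theorem solution_spec : Claim_equal_solution := by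
  intro N T inqs _
  unfold Spec_solution solution solution_alt
  by_cases hg : (inqs.map (fun p => p.1)).sum > T
  · simp only [if_pos hg]
  · simp only [if_neg hg]
    set lo0 := inqs.foldl (fun lo p => if p.1 > lo then p.1 else lo) 1 with hlo0
    set rsS := PySem.List.sorted (inqs.map (fun p => p.2)) (fun x => x) false with hrs
    have hlo1 : 1 ≤ lo0 := ((foldl_max_le inqs 1 lo0).mp le_rfl).1
    have hperm : rsS.Perm (inqs.map (fun p => p.2)) := PySem.List.sorted_perm _ _ _
    have hpw : rsS.Pairwise (· ≤ ·) := PySem.List.sorted_pairwise _ _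
    have hA := bsLoop_correct T inqs _ 1 1000000 (-1) rfl (by omega)
      (fun s hs1 hs2 => by omega) (Or.inl ⟨rfl, rfl⟩)
    have hB := scanGo_correct T 1000000 rsS lo0 0 hpw
    refine leastRes_unique _ _ lo0 1000000 _ _ hlo1 ?_ hA hB
    intro s hs1 hs2
    rw [isAbleGo_eq, decide_eq_true_eq]
    have hg2 : gsum (inqs.map (fun p => p.2)) s = gsum rsS s := gsum_perm _ _ s hperm.symm
    constructor
    · rintro ⟨ha, hb⟩
      refine ⟨(foldl_max_le inqs 1 s).mpr ⟨hs1, ha⟩, ?_⟩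
      omega
    · rintro ⟨ha, hb⟩
      have := (foldl_max_le inqs 1 s).mp ha
      exact ⟨this.2, by omega⟩
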